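-- pv_equiv track=rewrite | github.com/hhn-pham/AoC21 | day9_2.py | remove_not_deepest
-- ===== SOURCE A (Python) =====
-- def remove_not_deepest(line_map, replace):
--     """Remove areas of non troughs"""
--     map_horizontal = list(line_map)
--     for i in range(len(line_map) - 1):
--         if line_map[i] >= line_map[i + 1]:
--             map_horizontal[i] = replace
--     map_horizontal, line_map = map_horizontal[::-1], line_map[::-1]
--     for i in range(len(line_map) - 1):
--         if line_map[i] >= line_map[i + 1]:
--             map_horizontal[i] = replace
--     return map_horizontal[::-1]
-- ===== SOURCE B (Python) =====
-- def remove_not_deepest(line_map, replace):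
--     """Remove areas of non troughs"""
--     n = len(line_map)
--     return [replace if ((i > 0 and line_map[i] >= line_map[i - 1]) or
--                         (i < n - 1 and line_map[i] >= line_map[i + 1]))
--             else line_map[i]
--             for i in range(n)]
-- ===== Notes on version B (the rewrite author's own statement) =====
-- stated objective: simpler
-- what changed: A's two marking passes (forward, then again over both lists reversed, with three full list reversals) are replaced by one forward comprehension that checks both neighbours of each element directly.
import Mathlib
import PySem

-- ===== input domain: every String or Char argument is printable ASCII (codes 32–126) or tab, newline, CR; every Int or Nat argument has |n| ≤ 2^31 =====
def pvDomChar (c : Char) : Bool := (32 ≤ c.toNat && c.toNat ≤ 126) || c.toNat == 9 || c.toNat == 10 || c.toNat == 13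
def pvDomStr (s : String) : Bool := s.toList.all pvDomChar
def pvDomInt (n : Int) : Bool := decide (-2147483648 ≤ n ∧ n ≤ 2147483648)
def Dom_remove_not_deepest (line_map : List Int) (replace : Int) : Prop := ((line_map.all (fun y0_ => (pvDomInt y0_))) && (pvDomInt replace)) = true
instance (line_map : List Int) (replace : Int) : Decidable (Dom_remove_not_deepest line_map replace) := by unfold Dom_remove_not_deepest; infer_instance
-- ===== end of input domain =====

-- B replaces A's two marking passes (second one over both lists reversed, plus the final re-reversal)
-- by a single forward pass that checks both neighbours of each element; objective: simpler.

-- ===== PORT A =====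
-- literal transliteration: copy, forward pass setting marks, reverse both lists, second pass, reverse back
def remove_not_deepest (line_map : List Int) (replace : Int) : List Int :=
  let map_horizontal := line_map
  let map_horizontal :=
    (List.range (line_map.length - 1)).foldl
      (fun m i => if line_map.getD i 0 ≥ line_map.getD (i + 1) 0 then m.set i replace else m)
      map_horizontal
  let map_horizontal2 := map_horizontal.reverse
  let line_map2 := line_map.reverse
  let map_horizontal3 :=
    (List.range (line_map2.length - 1)).foldl
      (fun m i => if line_map2.getD i 0 ≥ line_map2.getD (i + 1) 0 then m.set i replace else m)
      map_horizontal2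
  map_horizontal3.reverse

-- ===== PORT B =====
-- literal transliteration of Source B: one comprehension over range(n) testing both neighbours
def remove_not_deepest_alt (line_map : List Int) (replace : Int) : List Int :=
  let n := line_map.length
  (List.range n).map (fun i =>
    if (0 < i ∧ line_map.getD i 0 ≥ line_map.getD (i - 1) 0) ∨
       (i < n - 1 ∧ line_map.getD i 0 ≥ line_map.getD (i + 1) 0)
    then replace else line_map.getD i 0)

-- ===== PRECONDITION & SPEC =====
def Spec_remove_not_deepest (line_map : List Int) (replace : Int) (out : List Int) : Prop := out = remove_not_deepest_alt line_map replace
instance (line_map : List Int) (replace : Int) (out : List Int) : Decidable (Spec_remove_not_deepest line_map replace out) := by unfold Spec_remove_not_deepest; infer_instance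

-- ===== CLAIM (what is proved, stated in full; the proofs are below) =====
def Claim_equal_remove_not_deepest : Prop := ∀ (line_map : List Int) (replace : Int), Dom_remove_not_deepest line_map replace → Spec_remove_not_deepest line_map replace (remove_not_deepest line_map replace)

-- ===== LEMMAS AND PROOFS =====

theorem markFold_length (c : Nat → Prop) [DecidablePred c] (r : Int) (m0 : List Int) (is : List Nat) :
    (is.foldl (fun m i => if c i then m.set i r else m) m0).length = m0.length := by
  induction is generalizing m0 with
  | nil => rfl
  | cons i is ih =>
    simp only [List.foldl_cons]
    rw [ih]
    split <;> simp

theorem markFold_getD (c : Nat → Prop) [DecidablePred c] (r : Int) (m0 : List Int) (k j : Nat)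
    (hj : j < m0.length) :
    ((List.range k).foldl (fun m i => if c i then m.set i r else m) m0).getD j 0
      = if j < k ∧ c j then r else m0.getD j 0 := by
  induction k with
  | zero => simp
  | succ k ih =>
    rw [List.range_succ, List.foldl_append, List.foldl_cons, List.foldl_nil]
    by_cases hck : c k
    · rw [if_pos hck]
      have hlen : ((List.range k).foldl (fun m i => if c i then m.set i r else m) m0).length = m0.length :=
        markFold_length c r m0 _
      have hjl : j < ((List.range k).foldl (fun m i => if c i then m.set i r else m) m0).length := by
        rw [hlen]; exact hj
      rw [List.getD_eq_getElem _ _ (by rw [List.length_set]; exact hjl), List.getElem_set,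
          ← List.getD_eq_getElem _ _ hjl, ih]
      by_cases hjk : k = j
      · subst hjk; simp [hck]
      · rw [if_neg hjk]
        by_cases h1 : j < k ∧ c j
        · rw [if_pos h1, if_pos ⟨Nat.lt_succ_of_lt h1.1, h1.2⟩]
        · rw [if_neg h1, if_neg (by rintro ⟨h2, h3⟩; exact h1 ⟨by omega, h3⟩)]
    · rw [if_neg hck, ih]
      by_cases h1 : j < k ∧ c j
      · rw [if_pos h1, if_pos ⟨Nat.lt_succ_of_lt h1.1, h1.2⟩]
      · rw [if_neg h1, if_neg (by
          rintro ⟨h2, h3⟩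
          rcases Nat.lt_succ_iff_lt_or_eq.mp h2 with h | h
          · exact h1 ⟨h, h3⟩
          · exact hck (h ▸ h3))]

theorem getD_reverse (l : List Int) (i : Nat) (hi : i < l.length) :
    l.reverse.getD i 0 = l.getD (l.length - 1 - i) 0 := by
  rw [List.getD_eq_getElem _ _ (by simpa using hi), List.getElem_reverse,
      List.getD_eq_getElem _ _ (by omega)]

-- ===== VERDICT (by name: the statement is the Claim_ definition above) =====
theorem remove_not_deepest_spec : Claim_equal_remove_not_deepest := by
  intro lm r _
  unfold Spec_remove_not_deepest remove_not_deepest remove_not_deepest_alt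
  simp only []
  set n := lm.length with hn
  -- name the two fold results
  set c1 : Nat → Prop := fun i => lm.getD i 0 ≥ lm.getD (i + 1) 0 with hc1
  set c2 : Nat → Prop := fun i => lm.reverse.getD i 0 ≥ lm.reverse.getD (i + 1) 0 with hc2
  have hlen1 : ((List.range (n - 1)).foldl (fun m i => if c1 i then m.set i r else m) lm).length = n :=
    markFold_length c1 r lm _
  set mh1 := (List.range (n - 1)).foldl (fun m i => if c1 i then m.set i r else m) lm with hmh1
  have hlenrev : lm.reverse.length = n := by simp [hn]
  have hlen3 : ((List.range (lm.reverse.length - 1)).foldl (fun m i => if c2 i then m.set i r else m) mh1.reverse).length = n := by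
    rw [markFold_length c2 r mh1.reverse _]; simp [hlen1]
  set mh3 := (List.range (lm.reverse.length - 1)).foldl (fun m i => if c2 i then m.set i r else m) mh1.reverse with hmh3
  apply List.ext_getElem
  · simp [hlen3, hn]
  intro j hj1 hj2
  have hjn : j < n := by simpa [hlen3] using hj1
  -- B side value
  rw [List.getElem_map, List.getElem_range]
  -- A side: reverse, then the fold characterisations
  rw [List.getElem_reverse]
  have hidx : mh3.length - 1 - j = n - 1 - j := by rw [hlen3]
  rw [← List.getD_eq_getElem mh3 _ (by omega), hidx, hmh3, hlenrev]
  have hrevlen1 : mh1.reverse.length = n := by simp [hlen1]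
  rw [markFold_getD c2 r mh1.reverse (n - 1) (n - 1 - j) (by omega)]
  have hmh1rev : mh1.reverse.getD (n - 1 - j) 0 = mh1.getD j 0 := by
    rw [getD_reverse mh1 _ (by omega), hlen1]
    congr 1; omega
  have hmh1j : mh1.getD j 0 = if j < n - 1 ∧ c1 j then r else lm.getD j 0 :=
    markFold_getD c1 r lm (n - 1) j (by omega)
  by_cases hj0 : 0 < j
  · have hcond : n - 1 - j < n - 1 := by omega
    have hc2j : c2 (n - 1 - j) ↔ lm.getD j 0 ≥ lm.getD (j - 1) 0 := by
      have e1 : lm.reverse.getD (n - 1 - j) 0 = lm.getD j 0 := by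
        rw [getD_reverse lm _ (by omega)]; congr 1; omega
      have e2 : lm.reverse.getD (n - 1 - j + 1) 0 = lm.getD (j - 1) 0 := by
        rw [getD_reverse lm _ (by omega)]; congr 1; omega
      simp only [hc2]
      rw [e1, e2]
    by_cases hL : lm.getD j 0 ≥ lm.getD (j - 1) 0
    · rw [if_pos ⟨hcond, hc2j.mpr hL⟩, if_pos (Or.inl ⟨hj0, hL⟩)]
    · rw [if_neg (by rintro ⟨_, h⟩; exact hL (hc2j.mp h)), hmh1rev, hmh1j]
      by_cases hR : j < n - 1 ∧ c1 j
      · rw [if_pos hR, if_pos (Or.inr ⟨hR.1, hR.2⟩)]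
      · rw [if_neg hR, if_neg (by rintro (⟨_, h⟩ | ⟨h1, h2⟩); exact hL h; exact hR ⟨h1, h2⟩)]
  · have hj0' : j = 0 := by omega
    subst hj0'
    rw [if_neg (by rintro ⟨h, _⟩; omega), hmh1rev, hmh1j]
    by_cases hR : 0 < n - 1 ∧ c1 0
    · rw [if_pos hR, if_pos (Or.inr ⟨hR.1, hR.2⟩)]
    · rw [if_neg hR, if_neg (by rintro (⟨h, _⟩ | ⟨h1, h2⟩); omega; exact hR ⟨h1, h2⟩)]
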